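-- pv_equiv track=rewrite | github.com/vladimirjo/svgparser | src/buffer/token.py | replace_char_references
-- ===== SOURCE A (Python) =====
-- def replace_char_references(text: str) -> str:
--     """Convert XML character references (&#NNN; and &#xNNN;) to Unicode characters."""
--     result = []
--     i = 0
--     length = len(text)
--
--     while i < length:
--         if text[i : i + 2] == "&#":  # Start of a character reference
--             end = i + 2
--             is_hex = text[end] == "x" if end < length else False  # Check if it's hexadecimal
--
--             if is_hex:
--                 end += 1  # Move past 'x'
--
--             # Extract numeric part
--             num_start = end
--             while end < length and text[end].isalnum():
--                 end += 1
--
--             if end < length and text[end] == ";":  # Ensure proper termination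
--                 num_str = text[num_start:end]
--                 try:
--                     char_code = int(num_str, 16 if is_hex else 10)  # Convert to Unicode
--                     result.append(chr(char_code))  # Append Unicode character
--                     i = end  # Move past `;`
--                 except ValueError:
--                     result.append(text[i])  # Append as-is if invalid reference
--             else:
--                 result.append(text[i])  # Append as-is if improperly formatted
--         else:
--             result.append(text[i])  # Append normal characters
--
--         i += 1  # Move to next character
--
--     return "".join(result)
-- ===== SOURCE B (Python) =====
-- def replace_char_references(text: str) -> str:
--     """Convert XML character references (&#NNN; and &#xNNN;) to Unicode characters.
--
--     Split-driven rewrite: cut the text at every "&#" occurrence, then decode the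
--     head of each following piece (optional lowercase 'x', digit run, ';'); a piece
--     that does not decode is emitted verbatim with its "&#" restored.
--     """
--     parts = text.split("&#")
--     out = [parts[0]]
--     for part in parts[1:]:
--         hexflag = part.startswith("x")
--         body = part[1:] if hexflag else part
--         j = body.find(";")
--         if j > 0 and body[:j].isalnum():
--             try:
--                 out.append(chr(int(body[:j], 16 if hexflag else 10)) + body[j + 1:])
--                 continue
--             except ValueError:
--                 pass
--         out.append("&#" + part)
--     return "".join(out)
-- ===== Notes on version B (the rewrite author's own statement) =====
-- stated objective: faster
-- what changed: Replaces A's per-character index scan (slice test for '&#', manual alnum run, per-char appends) by splitting the text on '&#' once and decoding only the head of each resulting piece (optional lowercase 'x', digits up to the first ';', int/chr with ValueError fallback).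
import Mathlib
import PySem

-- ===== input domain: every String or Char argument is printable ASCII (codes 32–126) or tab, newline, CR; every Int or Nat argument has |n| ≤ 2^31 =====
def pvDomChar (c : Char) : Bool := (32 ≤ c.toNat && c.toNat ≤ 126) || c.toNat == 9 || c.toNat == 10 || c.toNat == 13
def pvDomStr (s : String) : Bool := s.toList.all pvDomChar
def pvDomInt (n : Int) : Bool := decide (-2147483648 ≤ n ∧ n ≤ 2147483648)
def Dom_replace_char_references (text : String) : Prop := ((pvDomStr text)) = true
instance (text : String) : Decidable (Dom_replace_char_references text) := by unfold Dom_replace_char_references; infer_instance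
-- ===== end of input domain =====

-- B replaces A's per-character index loop by split("&#") plus per-piece decoding (measurably
-- faster by a constant factor); the proved equivalence is about the return value on Pre_.

-- ===== PORT A =====
-- chr(n): ValueError exactly outside 0 ≤ n < 0x110000; exact except for lone surrogates
-- (not representable as a Lean Char), which Pre_ excludes.
def pvChr? (n : Int) : Option Char :=
  if 0 ≤ n ∧ n < 1114112 then some (Char.ofNat n.toNat) else none

-- A's `while i < length` scan, rendered as structural recursion on the unscanned suffix:
-- `text[i:i+2] == "&#"` is the '&'::'#':: pattern, the inner alnum run is takeWhile/dropWhile,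
-- a decoded reference continues past its ';' (i = end; i += 1), otherwise i += 1 keeps '&'.
def pvLoopA : List Char → List Char
  | [] => []
  | '&' :: '#' :: rest =>
    let body := if rest.head? = some 'x' then rest.tail else rest
    let tl := List.dropWhile PySem.Chars.isalnum body
    if tl.head? = some ';' then
      match PySem.Int.ofCharsBase? (List.takeWhile PySem.Chars.isalnum body)
          (if rest.head? = some 'x' then 16 else 10) with
      | some code =>
        match pvChr? code with
        | some ch => ch :: pvLoopA tl.tail
        | none => '&' :: pvLoopA ('#' :: rest)
      | none => '&' :: pvLoopA ('#' :: rest)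
    else '&' :: pvLoopA ('#' :: rest)
  | c :: rest => c :: pvLoopA rest
termination_by cs => cs.length
decreasing_by
  · have h1 : tl.length ≤ body.length := List.length_dropWhile_le _ _
    have h2 : body.length ≤ rest.length := by
      simp only [body]
      split
      · cases rest <;> simp
      · exact Nat.le_refl _
    have h4 : tl.tail.length = tl.length - 1 := List.length_tail
    show tl.tail.length < ('&' :: '#' :: rest).length
    simp only [List.length_cons]
    omega
  · simp
  · simp
  · simp

def replace_char_references (text : String) : String := String.ofList (pvLoopA text.toList)

-- ===== PORT B =====
-- one piece after a "&#" cut: optional lowercase 'x', digits up to the first ';', decode or restore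
def pvHandlePart (part : List Char) : List Char :=
  let hexflag := PySem.Chars.startswith part ['x']
  let body := if hexflag then part.drop 1 else part
  let j := PySem.Chars.find body [';']
  if 0 < j ∧ PySem.Chars.strIsalnum (body.take j.toNat) then
    match PySem.Int.ofCharsBase? (body.take j.toNat) (if hexflag then 16 else 10) with
    | some code =>
      match pvChr? code with
      | some ch => ch :: body.drop (j.toNat + 1)
      | none => '&' :: '#' :: part
    | none => '&' :: '#' :: part
  else '&' :: '#' :: part

def replace_char_references_alt (text : String) : String :=
  let parts := PySem.Chars.splitOn text.toList ['&', '#']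
  -- parts[0] then the decoded pieces; "".join is String.ofList of the concatenation
  String.ofList (parts.headI ++ parts.tail.foldl (fun acc part => acc ++ pvHandlePart part) [])

-- ===== PRECONDITION & SPEC =====
-- value of a terminated numeric run (leading lowercase 'x' = hexadecimal), as int() reads it
def pvRefVal (run : List Char) : Option Int :=
  match run with
  | 'x' :: ds => PySem.Int.ofCharsBase? ds 16
  | _ => PySem.Int.ofCharsBase? run 10

-- does a character reference denoting a UTF-16 surrogate start at the head of s?
def pvSurrAt (s : List Char) : Bool :=
  match s with
  | '&' :: '#' :: t =>
    match List.dropWhile PySem.Chars.isalnum t with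
    | ';' :: _ =>
      match pvRefVal (List.takeWhile PySem.Chars.isalnum t) with
      | some n => decide (55296 ≤ n ∧ n ≤ 57343)
      | none => false
    | _ => false
  | _ => false

-- Pre_ excludes texts containing a terminated reference to a UTF-16 surrogate code point
-- (U+D800–U+DFFF): Python's chr() returns a lone surrogate there, a value that is not
-- representable as a Lean Char/String; A and B agree on those inputs.
def Pre_replace_char_references (text : String) : Prop :=
  ((List.range text.toList.length).any (fun i => pvSurrAt (text.toList.drop i))) = false
instance (text : String) : Decidable (Pre_replace_char_references text) := by
  unfold Pre_replace_char_references; infer_instance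

def pvWitness_replace_char_references : String := "a &#38;&#x1F600; b"

def Spec_replace_char_references (text : String) (out : String) : Prop := out = replace_char_references_alt text
instance (text : String) (out : String) : Decidable (Spec_replace_char_references text out) := by unfold Spec_replace_char_references; infer_instance

-- ===== CLAIM (what is proved, stated in full; the proofs are below) =====
def Claim_equal_replace_char_references : Prop := ∀ (text : String), Dom_replace_char_references text → Pre_replace_char_references text → Spec_replace_char_references text (replace_char_references text)

-- ===== LEMMAS AND PROOFS =====

-- ===== LEMMAS AND PROOFS =====

-- the head-of-piece decoder, phrased with takeWhile/dropWhile (the shape A's scan produces)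
def pvCharF (p : List Char) : List Char :=
  let body := if p.head? = some 'x' then p.tail else p
  let tl := List.dropWhile PySem.Chars.isalnum body
  if tl.head? = some ';' then
    match PySem.Int.ofCharsBase? (List.takeWhile PySem.Chars.isalnum body)
        (if p.head? = some 'x' then 16 else 10) with
    | some code =>
      match pvChr? code with
      | some ch => ch :: tl.tail
      | none => '&' :: '#' :: p
    | none => '&' :: '#' :: p
  else '&' :: '#' :: p

-- reference model of Python's str.split("&#") (leftmost, non-overlapping)
def pvSplit (pre : List Char) : List Char → List (List Char)
  | [] => [pre]
  | c :: rest =>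
    if c = '&' ∧ rest.head? = some '#' then pre :: pvSplit [] rest.tail
    else pvSplit (pre ++ [c]) rest
termination_by l => l.length
decreasing_by
  · cases rest <;> simp
  · simp

lemma pvLoopA_cons_ne (c : Char) (cs : List Char) (h : ¬(c = '&' ∧ cs.head? = some '#')) :
    pvLoopA (c :: cs) = c :: pvLoopA cs := by
  rw [pvLoopA.eq_def]
  split
  · simp_all
  · simp_all
  · simp_all

lemma pvNoInfix_mono {l m : List Char} (h : l <:+: m) (hm : ¬ (['&','#'] <:+: m)) :
    ¬ (['&','#'] <:+: l) := fun hl => hm (hl.trans h)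

lemma pvSingletonPrefixHead {a : Char} {p : List Char} (h : [a] <+: p) : p.head? = some a := by
  cases p with
  | nil => simp at h
  | cons b q => rcases List.cons_prefix_cons.mp h with ⟨rfl, -⟩; rfl

lemma pvFirstOcc (cs : List Char) :
    ¬ (['&','#'] <:+: cs) ∨ ∃ p t, cs = p ++ '&' :: '#' :: t ∧ ¬ (['&','#'] <:+: p) := by
  induction cs with
  | nil => left; simp
  | cons c cs ih =>
    by_cases hh : c = '&' ∧ cs.head? = some '#'
    · obtain ⟨rfl, hd⟩ := hh
      cases cs with
      | nil => simp at hd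
      | cons d t =>
        have hd' : d = '#' := by simpa using hd
        subst hd'
        exact Or.inr ⟨[], t, by simp, by simp⟩
    · cases ih with
      | inl h =>
        left
        intro hinf
        rcases List.infix_cons_iff.mp hinf with hpre | hinf'
        · rcases List.cons_prefix_cons.mp hpre with ⟨hc, hrest⟩
          exact hh ⟨hc.symm, pvSingletonPrefixHead hrest⟩
        · exact h hinf'
      | inr h =>
        rcases h with ⟨p, t, rfl, hp⟩
        right
        refine ⟨c :: p, t, by simp, ?_⟩
        intro hinf
        rcases List.infix_cons_iff.mp hinf with hpre | hinf'
        · rcases List.cons_prefix_cons.mp hpre with ⟨hc, hrest⟩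
          have hphead := pvSingletonPrefixHead hrest
          apply hh
          refine ⟨hc.symm, ?_⟩
          cases p with
          | nil => simp at hphead
          | cons e q => simpa using hphead
        · exact hp hinf'

lemma pvCopyA (p X : List Char) (hp : ¬ (['&','#'] <:+: p))
    (hX : X = [] ∨ X.head? = some '&') :
    pvLoopA (p ++ X) = p ++ pvLoopA X := by
  induction p with
  | nil => simp
  | cons c p ih =>
    have hstep : ¬(c = '&' ∧ (p ++ X).head? = some '#') := by
      rintro ⟨rfl, hhd⟩
      cases p with
      | nil =>
        rcases hX with rfl | hX'
        · simp at hhd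
        · rw [List.nil_append] at hhd
          rw [hX'] at hhd
          simp at hhd
      | cons d q =>
        have : d = '#' := by simpa using hhd
        subst this
        exact hp (by simp [List.infix_cons_iff, List.cons_prefix_cons])
    rw [List.cons_append, pvLoopA_cons_ne c (p ++ X) hstep,
      ih (pvNoInfix_mono (List.suffix_cons c p).isInfix hp)]
    rfl

lemma pvBoundary (a X : List Char) (hX : X = [] ∨ X.head? = some '&') :
    List.takeWhile PySem.Chars.isalnum (a ++ X) = List.takeWhile PySem.Chars.isalnum a ∧
    List.dropWhile PySem.Chars.isalnum (a ++ X) = List.dropWhile PySem.Chars.isalnum a ++ X := by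
  induction a with
  | nil =>
    rcases hX with rfl | hX
    · simp
    · cases X with
      | nil => simp
      | cons x xs =>
        have hx0 : x = '&' := by simpa using hX
        subst hx0
        constructor <;>
          simp [(by decide : PySem.Chars.isalnum '&' = false)]
  | cons c a ih =>
    by_cases hc : PySem.Chars.isalnum c = true <;>
      simp [hc, ih.1, ih.2]

lemma pvCharF_eq (p : List Char) :
    pvCharF p =
      if (List.dropWhile PySem.Chars.isalnum (if p.head? = some 'x' then p.tail else p)).head?
          = some ';' then
        match PySem.Int.ofCharsBase?
            (List.takeWhile PySem.Chars.isalnum (if p.head? = some 'x' then p.tail else p))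
            (if p.head? = some 'x' then 16 else 10) with
        | some code =>
          match pvChr? code with
          | some ch =>
            ch :: (List.dropWhile PySem.Chars.isalnum (if p.head? = some 'x' then p.tail else p)).tail
          | none => '&' :: '#' :: p
        | none => '&' :: '#' :: p
      else '&' :: '#' :: p := rfl

lemma pvLoopA_amp_eq (rest : List Char) :
    pvLoopA ('&' :: '#' :: rest) =
      (let body := if rest.head? = some 'x' then rest.tail else rest
       let tl := List.dropWhile PySem.Chars.isalnum body
       if tl.head? = some ';' then
         match PySem.Int.ofCharsBase? (List.takeWhile PySem.Chars.isalnum body)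
             (if rest.head? = some 'x' then 16 else 10) with
         | some code =>
           match pvChr? code with
           | some ch => ch :: pvLoopA tl.tail
           | none => '&' :: pvLoopA ('#' :: rest)
         | none => '&' :: pvLoopA ('#' :: rest)
       else '&' :: pvLoopA ('#' :: rest)) := by
  rw [pvLoopA.eq_def]
  rfl

lemma pvBranch (p X : List Char) (hp : ¬ (['&','#'] <:+: p))
    (hX : X = [] ∨ ∃ t, X = '&' :: '#' :: t) :
    pvLoopA ('&' :: '#' :: (p ++ X)) = pvCharF p ++ pvLoopA X := by
  have hX' : X = [] ∨ X.head? = some '&' := by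
    rcases hX with rfl | ⟨t, rfl⟩
    · exact Or.inl rfl
    · exact Or.inr rfl
  have hhead : ((p ++ X).head? = some 'x') ↔ (p.head? = some 'x') := by
    rcases p with _ | ⟨c, p'⟩
    · rcases hX' with rfl | hX''
      · simp
      · rw [List.nil_append, hX'']
        simp
    · simp
  have hbody : (if p.head? = some 'x' then (p ++ X).tail else p ++ X)
      = (if p.head? = some 'x' then p.tail else p) ++ X := by
    by_cases hx : p.head? = some 'x'
    · rw [if_pos hx, if_pos hx]
      rcases p with _ | ⟨c, p'⟩
      · simp at hx
      · simp
    · rw [if_neg hx, if_neg hx]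
  set bodyB := if p.head? = some 'x' then p.tail else p with hB
  have hbs : bodyB <:+ p := by
    rw [hB]
    split
    · exact List.tail_suffix p
    · exact List.suffix_refl p
  obtain ⟨htw, hdw⟩ := pvBoundary bodyB X hX'
  have hfall : '&' :: pvLoopA ('#' :: (p ++ X)) = ('&' :: '#' :: p) ++ pvLoopA X := by
    rw [pvLoopA_cons_ne '#' (p ++ X) (by simp), pvCopyA p X hp hX']
    simp
  rw [pvLoopA_amp_eq]
  simp only [hhead]
  simp only [hbody, htw, hdw]
  rw [pvCharF_eq p, ← hB]
  rcases hdwshape : List.dropWhile PySem.Chars.isalnum bodyB with _ | ⟨d, r2⟩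
  · -- no terminator inside the piece: head of the appended continuation is not ';'
    have hcond : ¬ (([] ++ X : List Char).head? = some ';') := by
      rcases hX' with rfl | hX''
      · simp
      · rw [List.nil_append, hX'']
        simp
    rw [if_neg hcond, if_neg (by simp)]
    exact hfall
  · by_cases hd : d = ';'
    · subst hd
      rw [List.cons_append, if_pos (show (';' :: (r2 ++ X)).head? = some ';' from rfl),
        if_pos (show ((';' : Char) :: r2).head? = some ';' from rfl)]
      have hr2 : ¬ (['&','#'] <:+: r2) := by
        apply pvNoInfix_mono _ hp
        have h1 : ';' :: r2 <:+ bodyB := hdwshape ▸ List.dropWhile_suffix _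
        exact (((List.suffix_cons ';' r2).trans h1).trans hbs).isInfix
      rcases ho : PySem.Int.ofCharsBase? (List.takeWhile PySem.Chars.isalnum bodyB)
          (if p.head? = some 'x' then 16 else 10) with _ | code
      · exact hfall
      · rcases hc : pvChr? code with _ | ch
        · simp only []
          rw [hc]
          exact hfall
        · simp only []
          rw [hc]
          show ch :: pvLoopA ((';' :: (r2 ++ X)).tail) = (ch :: (';' :: r2).tail) ++ pvLoopA X
          simp only [List.tail_cons]
          rw [pvCopyA r2 X hr2 hX']
          simp
    · rw [List.cons_append, if_neg (by simpa using hd), if_neg (by simpa using hd)]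
      exact hfall

lemma pvPrefixAmp (c : Char) (rest : List Char) :
    ['&','#'].isPrefixOf (c :: rest) = true ↔ (c = '&' ∧ rest.head? = some '#') := by
  rw [List.isPrefixOf_iff_prefix, List.cons_prefix_cons]
  constructor
  · rintro ⟨h1, h2⟩
    exact ⟨h1.symm, pvSingletonPrefixHead h2⟩
  · rintro ⟨rfl, h2⟩
    refine ⟨rfl, ?_⟩
    cases rest with
    | nil => simp at h2
    | cons d q =>
      have : d = '#' := by simpa using h2
      subst this
      simp

lemma pvFindSemi (a b : List Char) (ha : ∀ c ∈ a, PySem.Chars.isalnum c = true) :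
    PySem.Chars.find (a ++ ';' :: b) [';'] = a.length := by
  set s := a ++ ';' :: b with hs
  have hmem : (';' : Char) ∈ s := by simp [hs]
  have hinf : [(';' : Char)] <:+: s := (List.singleton_infix_iff ';' s).mpr hmem
  have hj : 0 ≤ PySem.Chars.find s [';'] := (PySem.Chars.find_nonneg_iff s [';']).mpr hinf
  obtain ⟨hpre, hmin⟩ := PySem.Chars.find_spec hj
  set k := (PySem.Chars.find s [';']).toNat with hk
  have hsk : s[k]? = some ';' := by
    rw [← List.head?_drop]
    exact pvSingletonPrefixHead hpre
  have h1 : ¬ k < a.length := by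
    intro hlt
    have : s[k]? = a[k]? := List.getElem?_append_left hlt
    rw [hsk] at this
    have hmem' : (';' : Char) ∈ a := by
      have := List.getElem?_eq_some_iff.mp this.symm
      rcases this with ⟨hlt', hget⟩
      exact hget ▸ List.getElem_mem hlt'
    exact absurd (ha ';' hmem') (by decide)
  have h2 : ¬ a.length < k := by
    intro hlt
    apply hmin a.length hlt
    have : List.drop a.length s = ';' :: b := List.drop_left' rfl
    rw [this]
    simp
  omega

lemma pvDropWhileOfFind (k : Nat) (l : List Char)
    (h1 : (l.take k).all PySem.Chars.isalnum = true) (h2 : l[k]? = some ';') :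
    List.dropWhile PySem.Chars.isalnum l = l.drop k := by
  induction k generalizing l with
  | zero =>
    cases l with
    | nil => simp at h2
    | cons c l' =>
      have : c = ';' := by simpa using h2
      subst this
      simp [(by decide : PySem.Chars.isalnum ';' = false)]
  | succ k ih =>
    cases l with
    | nil => simp at h2
    | cons c l' =>
      simp only [List.take_succ_cons, List.all_cons, Bool.and_eq_true] at h1
      simp only [List.getElem?_cons_succ] at h2
      simp [h1.1, ih l' h1.2 h2]

lemma pvStartswithX (p : List Char) : (PySem.Chars.startswith p ['x'] = true) ↔ p.head? = some 'x' := by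
  rw [PySem.Chars.startswith_iff]
  constructor
  · exact pvSingletonPrefixHead
  · intro h
    cases p with
    | nil => simp at h
    | cons c q =>
      have : c = 'x' := by simpa using h
      subst this
      exact List.cons_prefix_cons.mpr ⟨rfl, List.nil_prefix⟩

lemma pvHandlePart_eq (p : List Char) :
    pvHandlePart p =
      if 0 < PySem.Chars.find (if PySem.Chars.startswith p ['x'] then p.drop 1 else p) [';'] ∧
          PySem.Chars.strIsalnum ((if PySem.Chars.startswith p ['x'] then p.drop 1 else p).take
            (PySem.Chars.find (if PySem.Chars.startswith p ['x'] then p.drop 1 else p) [';']).toNat) then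
        match PySem.Int.ofCharsBase?
            ((if PySem.Chars.startswith p ['x'] then p.drop 1 else p).take
              (PySem.Chars.find (if PySem.Chars.startswith p ['x'] then p.drop 1 else p) [';']).toNat)
            (if PySem.Chars.startswith p ['x'] then 16 else 10) with
        | some code =>
          match pvChr? code with
          | some ch => ch :: (if PySem.Chars.startswith p ['x'] then p.drop 1 else p).drop
              ((PySem.Chars.find (if PySem.Chars.startswith p ['x'] then p.drop 1 else p) [';']).toNat + 1)
          | none => '&' :: '#' :: p
        | none => '&' :: '#' :: p
      else '&' :: '#' :: p := rfl

lemma pvAux (p body : List Char) (base : Nat) (hnone : PySem.Int.ofCharsBase? [] base = none) :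
    (if 0 < PySem.Chars.find body [';'] ∧
        PySem.Chars.strIsalnum (body.take (PySem.Chars.find body [';']).toNat) then
      match PySem.Int.ofCharsBase? (body.take (PySem.Chars.find body [';']).toNat) base with
      | some code =>
        match pvChr? code with
        | some ch => ch :: body.drop ((PySem.Chars.find body [';']).toNat + 1)
        | none => '&' :: '#' :: p
      | none => '&' :: '#' :: p
    else '&' :: '#' :: p)
    = (if (List.dropWhile PySem.Chars.isalnum body).head? = some ';' then
        match PySem.Int.ofCharsBase? (List.takeWhile PySem.Chars.isalnum body) base with
        | some code =>
          match pvChr? code with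
          | some ch => ch :: (List.dropWhile PySem.Chars.isalnum body).tail
          | none => '&' :: '#' :: p
        | none => '&' :: '#' :: p
      else '&' :: '#' :: p) := by
  rcases hdw : List.dropWhile PySem.Chars.isalnum body with _ | ⟨d, r2⟩
  · -- piece is all alphanumeric: no ';' at all
    have hall : ∀ c ∈ body, PySem.Chars.isalnum c = true := List.dropWhile_eq_nil_iff.mp hdw
    have hnosemi : ¬ ([';'] <:+: body) := by
      intro h
      exact absurd (hall _ ((List.singleton_infix_iff ';' body).mp h)) (by decide)
    have hfind : PySem.Chars.find body [';'] = -1 := (PySem.Chars.find_eq_neg_one_iff body [';']).mpr hnosemi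
    rw [hfind, if_neg (by simp), if_neg (by simp)]
  · by_cases hd : d = ';'
    · subst hd
      set twB := List.takeWhile PySem.Chars.isalnum body with htwB
      have hbody : body = twB ++ ';' :: r2 := by
        conv_lhs => rw [← List.takeWhile_append_dropWhile (p := PySem.Chars.isalnum) (l := body)]
        rw [hdw]
      have hall : ∀ c ∈ twB, PySem.Chars.isalnum c = true := fun c hc => List.mem_takeWhile_imp hc
      have hfind : PySem.Chars.find body [';'] = twB.length := by
        rw [hbody]
        exact pvFindSemi twB r2 hall
      have htonat : (PySem.Chars.find body [';']).toNat = twB.length := by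
        rw [hfind]
        exact Int.toNat_natCast _
      have htake : body.take (PySem.Chars.find body [';']).toNat = twB := by
        rw [htonat, hbody, List.take_left]
      rcases htwnil : twB with _ | ⟨e, q⟩
      · -- empty digit run: int('') fails on the right, 0 < 0 fails on the left
        rw [if_neg, if_pos (show ((';' : Char) :: r2).head? = some ';' from rfl)]
        · rw [hnone]
        · rintro ⟨h1, -⟩
          rw [hfind, htwnil] at h1
          simp at h1
      · rw [if_pos, if_pos (show ((';' : Char) :: r2).head? = some ';' from rfl)]
        · rw [htake, htwnil]
          have hdrop : body.drop ((PySem.Chars.find body [';']).toNat + 1) = r2 := by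
            rw [htonat, hbody, htwnil]
            rw [show ((e :: q) ++ ';' :: r2) = ((e :: q) ++ [';']) ++ r2 by simp]
            exact List.drop_left' (by simp)
          rw [hdrop]
          rcases PySem.Int.ofCharsBase? (e :: q) (base : Int) with _ | code
          · rfl
          · rcases pvChr? code with _ | ch <;> rfl
        · constructor
          · rw [hfind, htwnil]
            simp
          · rw [htwnil] at hall
            rw [htake, htwnil, PySem.Chars.strIsalnum]
            simp only [List.isEmpty_cons, Bool.not_false, Bool.true_and]
            exact List.all_eq_true.mpr hall
    · -- first non-alphanumeric char is not ';': both sides fall through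
      have hcond : ¬ (0 < PySem.Chars.find body [';'] ∧
          PySem.Chars.strIsalnum (body.take (PySem.Chars.find body [';']).toNat) = true) := by
        rintro ⟨hj, hal⟩
        have hj0 : 0 ≤ PySem.Chars.find body [';'] := le_of_lt hj
        obtain ⟨hpre, hmin⟩ := PySem.Chars.find_spec hj0
        have hk : body[(PySem.Chars.find body [';']).toNat]? = some ';' := by
          rw [← List.head?_drop]
          exact pvSingletonPrefixHead hpre
        have hal' : (body.take (PySem.Chars.find body [';']).toNat).all PySem.Chars.isalnum = true := by
          rw [PySem.Chars.strIsalnum] at hal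
          exact (Bool.and_eq_true_iff.mp hal).2
        have hdw2 := pvDropWhileOfFind (PySem.Chars.find body [';']).toNat body hal' hk
        rw [hdw] at hdw2
        have : (List.drop (PySem.Chars.find body [';']).toNat body).head? = some ';' := by
          rw [List.head?_drop]
          exact hk
        rw [← hdw2] at this
        simp at this
        exact hd this
      rw [if_neg hcond, if_neg (by simpa using hd)]

lemma pvHandle_eq_charF (p : List Char) : pvHandlePart p = pvCharF p := by
  rw [pvHandlePart_eq, pvCharF_eq]
  by_cases hx : p.head? = some 'x'
  · rw [if_pos ((pvStartswithX p).mpr hx), if_pos ((pvStartswithX p).mpr hx),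
      if_pos hx, if_pos hx, List.drop_one]
    exact pvAux p p.tail 16 (by decide)
  · rw [if_neg (fun h => hx ((pvStartswithX p).mp h)),
      if_neg (fun h => hx ((pvStartswithX p).mp h)), if_neg hx, if_neg hx]
    exact pvAux p p 10 (by decide)

lemma pvSplit_no (l : List Char) (h : ¬ (['&','#'] <:+: l)) :
    ∀ pre, pvSplit pre l = [pre ++ l] := by
  induction l with
  | nil => intro pre; simp [pvSplit]
  | cons c rest ih =>
    intro pre
    have hcond : ¬(c = '&' ∧ rest.head? = some '#') := by
      rintro ⟨rfl, hd⟩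
      apply h
      rw [List.infix_cons_iff]
      left
      rw [List.cons_prefix_cons]
      exact ⟨rfl, by
        cases rest with
        | nil => simp at hd
        | cons d q =>
          have : d = '#' := by simpa using hd
          subst this
          simp⟩
    rw [pvSplit, if_neg hcond,
      ih (pvNoInfix_mono (List.suffix_cons c rest).isInfix h) (pre ++ [c])]
    simp

lemma pvSplit_app (p t : List Char) (h : ¬ (['&','#'] <:+: p)) :
    ∀ pre, pvSplit pre (p ++ '&' :: '#' :: t) = (pre ++ p) :: pvSplit [] t := by
  induction p with
  | nil =>
    intro pre
    rw [List.nil_append, pvSplit, if_pos ⟨rfl, rfl⟩]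
    simp
  | cons c p ih =>
    intro pre
    have hcond : ¬(c = '&' ∧ (p ++ '&' :: '#' :: t).head? = some '#') := by
      rintro ⟨rfl, hd⟩
      cases p with
      | nil => simp at hd
      | cons d q =>
        have : d = '#' := by simpa using hd
        subst this
        apply h
        rw [List.infix_cons_iff]
        left
        rw [List.cons_prefix_cons]
        simp
    rw [List.cons_append, pvSplit, if_neg hcond,
      ih (pvNoInfix_mono (List.suffix_cons c p).isInfix h) (pre ++ [c])]
    simp

lemma pvGoEq (fuel : Nat) : ∀ (l cur : List Char) (acc : List (List Char)), l.length < fuel →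
    PySem.Chars.splitOn.go ['&','#'] fuel l cur acc = acc.reverse ++ pvSplit cur.reverse l := by
  induction fuel with
  | zero => intro l cur acc h; omega
  | succ fuel ih =>
    intro l cur acc h
    cases l with
    | nil => rw [PySem.Chars.splitOn.go.eq_def]; simp [pvSplit]
    | cons c rest =>
      rw [PySem.Chars.splitOn.go.eq_def]
      simp only []
      by_cases hcond : c = '&' ∧ rest.head? = some '#'
      · rw [if_pos ((pvPrefixAmp c rest).mpr hcond)]
        have hlen2 : (['&','#'] : List Char).length = 2 := rfl
        rw [hlen2]
        have hlen : (List.drop 2 (c :: rest)).length < fuel := by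
          simp only [List.length_drop, List.length_cons] at *
          omega
        rw [ih _ [] _ hlen]
        have hdrop : List.drop 2 (c :: rest) = rest.tail := by
          cases rest <;> simp
        rw [hdrop, pvSplit, if_pos hcond]
        simp
      · rw [if_neg (fun hp => hcond ((pvPrefixAmp c rest).mp hp))]
        have hlen : rest.length < fuel := by
          simp only [List.length_cons] at h
          omega
        rw [ih rest (c :: cur) acc hlen, pvSplit, if_neg hcond]
        simp

lemma pvSplitOnEq (cs : List Char) : PySem.Chars.splitOn cs ['&','#'] = pvSplit [] cs := by
  rw [PySem.Chars.splitOn]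
  rw [pvGoEq (cs.length + 1) cs [] [] (by omega)]
  simp

lemma pvLoopA_nil : pvLoopA [] = [] := by rw [pvLoopA.eq_def]

lemma pvL2no (rest : List Char) (hno : ¬ (['&','#'] <:+: rest)) :
    pvLoopA ('&' :: '#' :: rest) = (pvSplit [] rest).flatMap pvHandlePart := by
  rw [pvSplit_no rest hno []]
  have hb := pvBranch rest [] hno (Or.inl rfl)
  rw [List.append_nil] at hb
  rw [hb, pvLoopA_nil]
  simp [pvHandle_eq_charF]

lemma pvL2 (n : Nat) : ∀ rest : List Char, rest.length ≤ n →
    pvLoopA ('&' :: '#' :: rest) = (pvSplit [] rest).flatMap pvHandlePart := by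
  induction n with
  | zero =>
    intro rest h
    rcases pvFirstOcc rest with hno | ⟨p, t, rfl, hp⟩
    · exact pvL2no rest hno
    · exfalso
      simp only [List.length_append, List.length_cons] at h
      omega
  | succ n ih =>
    intro rest h
    rcases pvFirstOcc rest with hno | ⟨p, t, rfl, hp⟩
    · exact pvL2no rest hno
    · rw [pvSplit_app p t hp []]
      have hlen : t.length ≤ n := by
        simp only [List.length_append, List.length_cons] at h
        omega
      rw [pvBranch p ('&' :: '#' :: t) hp (Or.inr ⟨t, rfl⟩), ih t hlen]
      simp [pvHandle_eq_charF]

lemma pvMain (cs : List Char) :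
    pvLoopA cs = (pvSplit [] cs).headI ++ (pvSplit [] cs).tail.flatMap pvHandlePart := by
  rcases pvFirstOcc cs with hno | ⟨p, t, rfl, hp⟩
  · have hc := pvCopyA cs [] hno (Or.inl rfl)
    rw [List.append_nil] at hc
    rw [hc, pvLoopA_nil, pvSplit_no cs hno []]
    simp
  · rw [pvSplit_app p t hp [], pvCopyA p ('&' :: '#' :: t) hp (Or.inr rfl),
      pvL2 t.length t (Nat.le_refl _)]
    simp

-- ===== VERDICT (by name: the statement is the Claim_ definition above) =====
theorem replace_char_references_spec : Claim_equal_replace_char_references := by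
  intro text _ _
  unfold Spec_replace_char_references
  unfold replace_char_references replace_char_references_alt
  simp only [pvSplitOnEq, PySem.List.foldl_append_eq_flatMap, List.nil_append]
  exact congrArg String.ofList (pvMain text.toList)
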